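-- pv_equiv track=rewrite | github.com/nettoluis/competitive-programming-python | codeforces/boringApartments.py | contaTeclasAte
-- ===== SOURCE A (Python) =====
-- def contaTeclasAte(limite):
--     teclas = 0
--     for i in range(1, 10):
--         for j in [1, 11, 111, 1111]:
--             numero = i * j
--             teclas += len(str(numero))
--             if numero == limite:
--                 return teclas
-- ===== SOURCE B (Python) =====
-- def contaTeclasAte(limite):
--     # closed form: a boring number is a digit d (1..9) repeated r (1..4) times,
--     # i.e. d * rep with rep the repunit 1, 11, 111, 1111
--     rep = 0
--     for r in range(1, 5):
--         rep = rep * 10 + 1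
--         d, m = divmod(limite, rep)
--         if m == 0 and 1 <= d <= 9:
--             return (d - 1) * 10 + r * (r + 1) // 2
-- ===== Notes on version B (the rewrite author's own statement) =====
-- stated objective: simpler
-- what changed: Replaced A's double loop over digits and repunits, which accumulates keystroke counts until it hits limite, with one short loop over repetition lengths that tests divisibility of limite by the growing repunit and returns the keystroke count from a closed arithmetic formula.
import Mathlib
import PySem

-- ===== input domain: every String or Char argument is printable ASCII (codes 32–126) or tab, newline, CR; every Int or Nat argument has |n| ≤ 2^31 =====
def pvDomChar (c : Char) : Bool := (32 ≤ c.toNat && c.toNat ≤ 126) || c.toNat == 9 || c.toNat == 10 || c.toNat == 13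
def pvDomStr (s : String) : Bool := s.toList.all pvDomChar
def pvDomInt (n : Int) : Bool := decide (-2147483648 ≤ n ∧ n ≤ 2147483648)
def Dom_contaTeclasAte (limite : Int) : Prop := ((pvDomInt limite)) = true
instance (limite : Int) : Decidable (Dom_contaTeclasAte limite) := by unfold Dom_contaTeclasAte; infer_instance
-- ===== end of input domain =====

-- B replaces A's 36-iteration double loop (digit × repunit, counting keystrokes as it goes)
-- by a 4-step divisibility test on the repunits with a closed keystroke formula (objective: simpler).

-- ===== PORT A =====
-- inner loop over j ∈ [1,11,111,1111]; returns (early-return result, updated teclas)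
def pvInnerA (limite i : Int) : List Int → Int → Option Int × Int
  | [], teclas => (none, teclas)
  | j :: js, teclas =>
    let numero := i * j
    let teclas' := teclas + (PySem.Str.len (PySem.Int.toStr numero))
    if numero = limite then (some teclas', teclas') else pvInnerA limite i js teclas'

-- outer loop over i ∈ range(1,10)
def pvOuterA (limite : Int) : List Int → Int → Option Int
  | [], _ => none
  | i :: is, teclas =>
    match pvInnerA limite i [1, 11, 111, 1111] teclas with
    | (some r, _) => some r
    | (none, teclas') => pvOuterA limite is teclas'

def contaTeclasAte (limite : Int) : Option Int :=
  pvOuterA limite (PySem.List.pyRange 1 10 1) 0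

-- ===== PORT B =====
-- loop over r ∈ range(1,5), rep the growing repunit; divmod test + closed formula
def pvLoopB (limite : Int) : List Int → Int → Option Int
  | [], _ => none
  | r :: rs, rep0 =>
    let rep := rep0 * 10 + 1
    let d := PySem.Int.floordiv limite rep
    let m := PySem.Int.mod limite rep
    if m = 0 ∧ 1 ≤ d ∧ d ≤ 9 then
      some ((d - 1) * 10 + PySem.Int.floordiv (r * (r + 1)) 2)
    else pvLoopB limite rs rep

def contaTeclasAte_alt (limite : Int) : Option Int :=
  pvLoopB limite (PySem.List.pyRange 1 5 1) 0

-- ===== PRECONDITION & SPEC =====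
def Spec_contaTeclasAte (limite : Int) (out : Option Int) : Prop := out = contaTeclasAte_alt limite
instance (limite : Int) (out : Option Int) : Decidable (Spec_contaTeclasAte limite out) := by unfold Spec_contaTeclasAte; infer_instance

-- ===== CLAIM (what is proved, stated in full; the proofs are below) =====
def Claim_equal_contaTeclasAte : Prop := ∀ (limite : Int), Dom_contaTeclasAte limite → Spec_contaTeclasAte limite (contaTeclasAte limite)

-- ===== LEMMAS AND PROOFS =====

-- the 36 boring numbers, in A's traversal order
def pvBoring : List Int :=
  [1, 11, 111, 1111, 2, 22, 222, 2222, 3, 33, 333, 3333, 4, 44, 444, 4444,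
   5, 55, 555, 5555, 6, 66, 666, 6666, 7, 77, 777, 7777, 8, 88, 888, 8888,
   9, 99, 999, 9999]

theorem pvInnerA_none (limite i : Int) (js : List Int) :
    (∀ j ∈ js, i * j ≠ limite) → ∀ t, ∃ t', pvInnerA limite i js t = (none, t') := by
  intro h t
  induction js generalizing t with
  | nil => exact ⟨t, rfl⟩
  | cons j js ih =>
    have hj : i * j ≠ limite := h j (List.mem_cons_self ..)
    simp only [pvInnerA, if_neg hj]
    exact ih (fun j hm => h j (List.mem_cons_of_mem _ hm)) _

theorem pvOuterA_none (limite : Int) (is : List Int) :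
    (∀ i ∈ is, ∀ j ∈ ([1, 11, 111, 1111] : List Int), i * j ≠ limite) →
    ∀ t, pvOuterA limite is t = none := by
  intro h t
  induction is generalizing t with
  | nil => rfl
  | cons i is ih =>
    obtain ⟨t', ht⟩ := pvInnerA_none limite i [1, 11, 111, 1111]
      (h i (List.mem_cons_self ..)) t
    simp only [pvOuterA, ht]
    exact ih (fun i hm => h i (List.mem_cons_of_mem _ hm)) _

theorem main_eq (limite : Int) : contaTeclasAte limite = contaTeclasAte_alt limite := by
  by_cases hb : limite ∈ pvBoring
  · fin_cases hb <;> decide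
  · -- limite is not boring: both sides return none
    simp only [pvBoring, List.mem_cons, List.not_mem_nil, or_false] at hb
    push Not at hb
    obtain ⟨h1, h2, h3, h4, h5, h6, h7, h8, h9, h10, h11, h12, h13, h14, h15, h16,
      h17, h18, h19, h20, h21, h22, h23, h24, h25, h26, h27, h28, h29, h30, h31, h32,
      h33, h34, h35, h36⟩ := hb
    have hA : contaTeclasAte limite = none := by
      unfold contaTeclasAte
      have hr : PySem.List.pyRange 1 10 1 = [1, 2, 3, 4, 5, 6, 7, 8, 9] := by decide
      rw [hr]
      refine pvOuterA_none limite _ ?_ 0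
      intro i hi j hj
      fin_cases hi <;> fin_cases hj <;> omega
    have hB : contaTeclasAte_alt limite = none := by
      unfold contaTeclasAte_alt
      have hr : PySem.List.pyRange 1 5 1 = [1, 2, 3, 4] := by decide
      rw [hr]
      simp only [pvLoopB]
      norm_num
      split_ifs <;> first | rfl | (exfalso; omega)
    rw [hA, hB]

-- ===== VERDICT (by name: the statement is the Claim_ definition above) =====
theorem contaTeclasAte_spec : Claim_equal_contaTeclasAte := by
  intro limite _
  exact main_eq limite
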